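-- pv_equiv track=rewrite | github.com/cleverice007/Ntu2020Q1_News | source_code_3/__APPTemplate/app/main/views.py | process_rtn_data
-- ===== SOURCE A (Python) =====
-- def process_rtn_data(rtn_data):
--   rtn_data = {k: v for k, v in sorted(rtn_data.items(), key=lambda item: item[0])}
--   results = []
--   keys = list(rtn_data.keys())
--   len_keys = len(keys)
--
--   for i in range(0, len_keys, 2):
--     if i + 1 < len_keys:
--       source1 = keys[i]
--       source2 = keys[i+1]
--       tmp = [source1, source2]
--     else:
--       tmp = [keys[i], '']
--     results.append(tmp)
--
--   return results
-- ===== SOURCE B (Python) =====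
-- def process_rtn_data(rtn_data):
--   pairs = []
--   pending = None
--   for k in sorted(rtn_data):
--     if pending is None:
--       pending = k
--     else:
--       pairs.append([pending, k])
--       pending = None
--   if pending is not None:
--     pairs.append([pending, ''])
--   return pairs
-- ===== Notes on version B (the rewrite author's own statement) =====
-- stated objective: simpler
-- what changed: Replaces A's index-stepping loop over range(0, len, 2) with keys[i]/keys[i+1] indexing and an i+1 < len guard (plus an intermediate sorted-items dict rebuild) by a single indexless pass over sorted(rtn_data) carrying a 'pending' first-of-pair accumulator.
import Mathlib
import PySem

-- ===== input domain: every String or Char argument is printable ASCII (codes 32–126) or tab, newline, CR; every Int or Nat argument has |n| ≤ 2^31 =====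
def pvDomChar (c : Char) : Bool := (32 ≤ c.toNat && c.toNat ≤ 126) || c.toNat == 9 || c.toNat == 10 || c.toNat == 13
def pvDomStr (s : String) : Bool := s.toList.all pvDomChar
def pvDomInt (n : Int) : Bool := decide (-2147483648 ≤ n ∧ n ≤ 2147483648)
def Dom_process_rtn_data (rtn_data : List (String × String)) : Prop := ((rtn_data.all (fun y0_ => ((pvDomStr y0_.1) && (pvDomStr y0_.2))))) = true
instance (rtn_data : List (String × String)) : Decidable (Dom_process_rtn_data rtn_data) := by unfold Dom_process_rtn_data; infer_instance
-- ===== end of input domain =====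

-- B replaces A's index-stepping loop (range(0, n, 2) with an `i+1 < len` guard and keys[i]/keys[i+1]
-- indexing) by a single indexless pass over the sorted keys carrying a `pending` first-of-pair
-- accumulator; objective: simpler/idiomatic, same O(n log n) cost.

-- ===== PORT A =====
-- Python's `for i in range(0, len_keys, 2)` transliterated as recursion on the index i stepping by 2;
-- the body indexes with PySem.List.pyGet? (always in range here), `.getD ""` only extracts the value.
def pvLoopA (keys : List String) (n : Int) (i : Int) (acc : List (List String)) : List (List String) :=
  if i < n then
    let tmp := if i + 1 < n then
        [(PySem.List.pyGet? keys i).getD "", (PySem.List.pyGet? keys (i + 1)).getD ""]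
      else
        [(PySem.List.pyGet? keys i).getD "", ""]
    pvLoopA keys n (i + 2) (acc ++ [tmp])
  else acc
termination_by (n - i).toNat
decreasing_by omega

def process_rtn_data (rtn_data : List (String × String)) : List (List String) :=
  -- rtn_data = {k: v for k, v in sorted(rtn_data.items(), key=lambda item: item[0])}
  let items := PySem.List.sorted rtn_data (fun item => item.1) false
  let d : PySem.Dict String String := PySem.Dict.ofList items
  -- keys = list(rtn_data.keys()); len_keys = len(keys)
  let keys := d.keys
  let len_keys : Int := keys.length
  pvLoopA keys len_keys 0 []

-- ===== PORT B =====
-- `for k in sorted(rtn_data)` iterates the dict's (distinct, insertion-ordered) keys, sorted;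
-- state (pairs, pending) with pending : Option String = None/first-of-pair.
def process_rtn_data_alt (rtn_data : List (String × String)) : List (List String) :=
  let sortedKeys := PySem.List.sorted (PySem.Set.ofList (rtn_data.map Prod.fst)) (fun k => k) false
  let st := sortedKeys.foldl
    (fun (st : List (List String) × Option String) k =>
      match st.2 with
      | none => (st.1, some k)
      | some p => (st.1 ++ [[p, k]], none))
    ([], none)
  match st.2 with
  | none => st.1
  | some p => st.1 ++ [[p, ""]]

-- ===== PRECONDITION & SPEC =====
def Spec_process_rtn_data (rtn_data : List (String × String)) (out : List (List String)) : Prop := out = process_rtn_data_alt rtn_data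
instance (rtn_data : List (String × String)) (out : List (List String)) : Decidable (Spec_process_rtn_data rtn_data out) := by unfold Spec_process_rtn_data; infer_instance

-- ===== CLAIM (what is proved, stated in full; the proofs are below) =====
def Claim_equal_process_rtn_data : Prop := ∀ (rtn_data : List (String × String)), Dom_process_rtn_data rtn_data → Spec_process_rtn_data rtn_data (process_rtn_data rtn_data)

-- ===== LEMMAS AND PROOFS =====

-- Canonical form both sides are reduced to: pair up the elements of a list, '' filling the last slot.
def pvPairUp : List String → List (List String)
  | [] => []
  | [a] => [[a, ""]]
  | a :: b :: t => [a, b] :: pvPairUp t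

-- A's loop computes pvPairUp of the suffix of keys from index k on.
theorem pvLoopA_eq (ks : List String) :
    ∀ (k : Nat) (acc : List (List String)),
      pvLoopA ks (ks.length : Int) (k : Int) acc = acc ++ pvPairUp (ks.drop k) := by
  intro k
  induction hn : ks.length - k using Nat.strong_induction_on generalizing k with
  | _ n ih =>
  intro acc
  rw [pvLoopA]
  by_cases hk : k < ks.length
  · have hlt : (k : Int) < (ks.length : Int) := by exact_mod_cast hk
    have hdrop : ks.drop k = ks[k] :: ks.drop (k + 1) := List.drop_eq_getElem_cons hk
    have hget : (PySem.List.pyGet? ks (k : Int)).getD "" = ks[k] := by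
      rw [PySem.List.pyGet?_natCast, List.getElem?_eq_getElem hk, Option.getD_some]
    have hcast2 : (k : Int) + 2 = ((k + 2 : Nat) : Int) := by push_cast; ring
    by_cases hk1 : k + 1 < ks.length
    · have hlt1 : (k : Int) + 1 < (ks.length : Int) := by exact_mod_cast hk1
      have hdrop1 : ks.drop (k + 1) = ks[k + 1] :: ks.drop (k + 2) :=
        List.drop_eq_getElem_cons hk1
      have hget1 : (PySem.List.pyGet? ks ((k : Int) + 1)).getD "" = ks[k + 1] := by
        have : (k : Int) + 1 = ((k + 1 : Nat) : Int) := by push_cast; ring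
        rw [this, PySem.List.pyGet?_natCast, List.getElem?_eq_getElem hk1, Option.getD_some]
      rw [if_pos hlt, if_pos hlt1, hget, hget1, hcast2,
        ih (ks.length - (k + 2)) (by omega) (k + 2) rfl]
      rw [hdrop, hdrop1, pvPairUp, List.append_assoc]
      rfl
    · have hlen : ks.length = k + 1 := by omega
      have hlt1 : ¬ ((k : Int) + 1 < (ks.length : Int)) := by
        intro h; exact hk1 (by exact_mod_cast h)
      have hdrop1 : ks.drop (k + 1) = [] := by
        apply List.drop_eq_nil_of_le; omega
      rw [if_pos hlt, if_neg hlt1, hget, hcast2,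
        ih (ks.length - (k + 2)) (by omega) (k + 2) rfl]
      have hdrop2 : ks.drop (k + 2) = [] := by
        apply List.drop_eq_nil_of_le; omega
      rw [hdrop, hdrop1, hdrop2, pvPairUp, pvPairUp, List.append_assoc]
      rfl
  · have hge : ¬ ((k : Int) < (ks.length : Int)) := by
      intro h; exact hk (by exact_mod_cast h)
    have hdrop : ks.drop k = [] := by apply List.drop_eq_nil_of_le; omega
    rw [if_neg hge, hdrop, pvPairUp, List.append_nil]

-- B's pending-accumulator fold computes pvPairUp of the whole key list.
theorem pvFoldB_eq (ks : List String) :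
    ∀ (acc : List (List String)),
      (match (ks.foldl
          (fun (st : List (List String) × Option String) k =>
            match st.2 with
            | none => (st.1, some k)
            | some p => (st.1 ++ [[p, k]], none))
          (acc, none)).2 with
        | none => (ks.foldl
            (fun (st : List (List String) × Option String) k =>
              match st.2 with
              | none => (st.1, some k)
              | some p => (st.1 ++ [[p, k]], none))
            (acc, none)).1
        | some p => (ks.foldl
            (fun (st : List (List String) × Option String) k =>
              match st.2 with
              | none => (st.1, some k)
              | some p => (st.1 ++ [[p, k]], none))
            (acc, none)).1 ++ [[p, ""]]) = acc ++ pvPairUp ks := by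
  induction ks using pvPairUp.induct with
  | case1 => intro acc; simp [pvPairUp]
  | case2 a => intro acc; simp [pvPairUp, List.foldl]
  | case3 a b t ih =>
    intro acc
    simp only [List.foldl]
    rw [ih (acc ++ [[a, b]])]
    rw [pvPairUp, List.append_assoc]
    rfl

-- PySem.Set.ofList keeps a subsequence of the original list.
theorem pvOfList_sublist {α : Type} [BEq α] [LawfulBEq α] (l : List α) :
    (PySem.Set.ofList l).Sublist l := by
  induction l with
  | nil => simp [PySem.Set.ofList_nil]
  | cons x xs ih =>
    rw [PySem.Set.ofList_cons]
    refine List.Sublist.cons₂ x (List.Sublist.trans ?_ ih)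
    simp only [PySem.Set.discard]
    exact List.filter_sublist

-- The key list A pairs up equals the key list B pairs up.
theorem pvKeys_eq (rtn_data : List (String × String)) :
    (PySem.Dict.ofList (κ := String) (ν := String)
        (PySem.List.sorted rtn_data (fun item => item.1) false)).keys =
      PySem.List.sorted (PySem.Set.ofList (rtn_data.map Prod.fst)) (fun k => k) false := by
  have hA : (PySem.Dict.ofList (κ := String) (ν := String)
      (PySem.List.sorted rtn_data (fun item => item.1) false)).keys =
      PySem.Set.ofList ((PySem.List.sorted rtn_data (fun item => item.1) false).map Prod.fst) := by
    show (List.foldl (fun d p => d.insert p.1 p.2) PySem.Dict.empty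
        (PySem.List.sorted rtn_data (fun item => item.1) false)).keys = _
    rw [PySem.Dict.keys_foldl_insert_key
      (key := Prod.fst) (f := fun _ p => p.2)]
    simp [PySem.Set.update_nil_left]
  set keysA := PySem.Set.ofList ((PySem.List.sorted rtn_data (fun item => item.1) false).map Prod.fst) with hkA
  set keysB := PySem.List.sorted (PySem.Set.ofList (rtn_data.map Prod.fst)) (fun k => k) false with hkB
  rw [hA]
  -- both are Nodup
  have hndA : keysA.Nodup := PySem.Set.nodup_ofList _
  have hndB : keysB.Nodup := by
    have := PySem.List.sorted_perm (PySem.Set.ofList (rtn_data.map Prod.fst)) (fun k => k) false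
    exact this.nodup_iff.mpr (PySem.Set.nodup_ofList _)
  -- both are Pairwise (· ≤ ·)
  have hpA : keysA.Pairwise (· ≤ ·) := by
    have hs : ((PySem.List.sorted rtn_data (fun item => item.1) false).map
        Prod.fst).Pairwise (· ≤ ·) := by
      rw [List.pairwise_map]
      exact PySem.List.sorted_pairwise rtn_data (fun item => item.1)
    exact hs.sublist (pvOfList_sublist _)
  have hpB : keysB.Pairwise (· ≤ ·) :=
    PySem.List.sorted_pairwise (PySem.Set.ofList (rtn_data.map Prod.fst)) (fun k => k)
  -- same members, hence a permutation
  have hmem : ∀ x, x ∈ keysA ↔ x ∈ keysB := by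
    intro x
    rw [hkA, hkB, PySem.Set.mem_ofList,
      (PySem.List.sorted_perm (PySem.Set.ofList (rtn_data.map Prod.fst)) (fun k => k)
        false).mem_iff,
      PySem.Set.mem_ofList,
      ((PySem.List.sorted_perm rtn_data (fun item => item.1) false).map Prod.fst).mem_iff]
  have hperm : keysA.Perm keysB := (List.perm_ext_iff_of_nodup hndA hndB).mpr hmem
  exact List.Perm.eq_of_pairwise (fun a b _ _ hab hba => le_antisymm hab hba) hpA hpB hperm

-- ===== VERDICT (by name: the statement is the Claim_ definition above) =====
theorem process_rtn_data_spec : Claim_equal_process_rtn_data := by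
  intro rtn_data _
  unfold Spec_process_rtn_data
  simp only [process_rtn_data, process_rtn_data_alt]
  rw [pvKeys_eq]
  have hA := pvLoopA_eq
    (PySem.List.sorted (PySem.Set.ofList (rtn_data.map Prod.fst)) (fun k => k) false) 0 []
  simp only [Nat.cast_zero, List.drop_zero, List.nil_append] at hA
  rw [hA]
  have hB := pvFoldB_eq
    (PySem.List.sorted (PySem.Set.ofList (rtn_data.map Prod.fst)) (fun k => k) false) []
  simp only [List.nil_append] at hB
  exact hB.symm
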